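-- pv_equiv track=rewrite | github.com/liziwl/Bugine | model/search_rank.py | get_key_sea_count
-- ===== SOURCE A (Python) =====
-- import copy
--
-- def get_key_sea_count(all_key, text, unique=False):
--     if type(text) != set:
--         f_c = set(text) if unique else text
--     count_dict = {}
--     for k in all_key:
--         count_dict[k] = 0
--     for k in f_c:
--         if k in all_key:
--             count_dict[k] += 1
--     count_dict["__corpus_len__"] = len(f_c)
--     return copy.deepcopy(count_dict)
-- ===== SOURCE B (Python) =====
-- import copy
--
-- def get_key_sea_count(all_key, text, unique=False):
--     # Build a frequency table of the corpus once, then drive over all_key reading counts.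
--     pool = set(text) if unique else text
--     freq = {}
--     for t in pool:
--         freq[t] = freq.get(t, 0) + 1
--     count_dict = {k: freq.get(k, 0) for k in all_key}
--     count_dict["__corpus_len__"] = len(pool)
--     return count_dict
-- ===== Notes on version B (the rewrite author's own statement) =====
-- stated objective: faster
-- what changed: A initialises zeros then scans every corpus token with an O(|all_key|) membership test and in-place increments; B builds a hash frequency table of the corpus in one pass and then constructs the result by iterating over all_key and looking each key's count up in that table.
import Mathlib
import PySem

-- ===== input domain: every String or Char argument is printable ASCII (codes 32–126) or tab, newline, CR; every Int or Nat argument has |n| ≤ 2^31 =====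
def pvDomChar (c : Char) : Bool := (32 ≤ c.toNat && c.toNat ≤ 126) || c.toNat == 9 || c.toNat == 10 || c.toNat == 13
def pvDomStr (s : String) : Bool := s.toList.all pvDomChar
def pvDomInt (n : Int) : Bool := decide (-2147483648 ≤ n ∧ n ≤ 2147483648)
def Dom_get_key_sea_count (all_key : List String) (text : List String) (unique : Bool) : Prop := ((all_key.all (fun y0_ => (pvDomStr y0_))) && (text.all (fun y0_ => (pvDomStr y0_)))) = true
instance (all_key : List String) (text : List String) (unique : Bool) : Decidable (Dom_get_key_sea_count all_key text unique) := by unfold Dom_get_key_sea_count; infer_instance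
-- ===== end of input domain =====

-- B replaces A's per-token membership scan over all_key by a frequency table built once
-- and a lookup-driven pass over all_key (asymptotically faster); return values proved equal.


-- ===== PORT A =====
-- f_c = set(text) if unique else text; init all keys to 0; scan f_c, increment keys found
-- via `k in all_key` membership; then set "__corpus_len__"; return the dict's items.
def get_key_sea_count (all_key : List String) (text : List String) (unique : Bool) : List (String × Int) :=
  let f_c := if unique then PySem.Set.ofList text else text
  let d0 := all_key.foldl (fun d k => d.insert k 0) (PySem.Dict.empty : PySem.Dict String Int)
  let d1 := f_c.foldl (fun d k => if k ∈ all_key then d.modify k 0 (· + 1) else d) d0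
  (d1.insert "__corpus_len__" (f_c.length : Int)).items

-- ===== PORT B =====
-- pool = set(text) if unique else text; freq[t] = freq.get(t,0)+1 over pool; then
-- count_dict = {k: freq.get(k,0) for k in all_key}; set "__corpus_len__"; return items.
def get_key_sea_count_alt (all_key : List String) (text : List String) (unique : Bool) : List (String × Int) :=
  let pool := if unique then PySem.Set.ofList text else text
  let freq := pool.foldl (fun d t => d.insert t (d.getD t 0 + 1)) (PySem.Dict.empty : PySem.Dict String Int)
  let cd := all_key.foldl (fun d k => d.insert k (freq.getD k 0)) (PySem.Dict.empty : PySem.Dict String Int)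
  (cd.insert "__corpus_len__" (pool.length : Int)).items

-- ===== PRECONDITION & SPEC =====
def Spec_get_key_sea_count (all_key : List String) (text : List String) (unique : Bool) (out : List (String × Int)) : Prop := out = get_key_sea_count_alt all_key text unique
instance (all_key : List String) (text : List String) (unique : Bool) (out : List (String × Int)) : Decidable (Spec_get_key_sea_count all_key text unique out) := by unfold Spec_get_key_sea_count; infer_instance

-- ===== CLAIM (what is proved, stated in full; the proofs are below) =====
def Claim_equal_get_key_sea_count : Prop := ∀ (all_key : List String) (text : List String) (unique : Bool), Dom_get_key_sea_count all_key text unique → Spec_get_key_sea_count all_key text unique (get_key_sea_count all_key text unique)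

-- ===== LEMMAS AND PROOFS =====

-- A fold of inserts whose value depends on the key only: final value is g v for v ∈ ak.
theorem gksc_getD_insert_fold (g : String → Int) (ak : List String) (d : PySem.Dict String Int) (v : String) :
    (ak.foldl (fun d k => d.insert k (g k)) d).getD v 0
      = if v ∈ ak then g v else d.getD v 0 := by
  induction ak generalizing d with
  | nil => simp
  | cons a ak ih =>
    simp only [List.foldl_cons, ih, PySem.Dict.getD_insert, List.mem_cons]
    by_cases h1 : v ∈ ak <;> by_cases h2 : v = a <;> simp [h1, h2]

-- A's guarded increment loop: final value = initial value + count of v in pool (if v ∈ ak).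
theorem gksc_getD_count (ak pool : List String) (d : PySem.Dict String Int) (v : String) :
    (pool.foldl (fun d k => if k ∈ ak then d.modify k 0 (· + 1) else d) d).getD v 0
      = d.getD v 0 + (if v ∈ ak then (pool.count v : Int) else 0) := by
  induction pool generalizing d with
  | nil => simp
  | cons t pool ih =>
    simp only [List.foldl_cons]
    by_cases ht : t ∈ ak
    · simp only [ht, if_true, ih, PySem.Dict.getD_modify]
      by_cases hv : v = t
      · subst hv
        simp [ht, List.count_cons_self]
        ring
      · have : pool.count v = (t :: pool).count v := by
          simp [Ne.symm hv]
        rw [this]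
        simp [hv]
    · simp only [ht, if_false, ih]
      by_cases hv : v ∈ ak
      · have hvt : v ≠ t := fun h => ht (h ▸ hv)
        have : pool.count v = (t :: pool).count v := by
          simp [Ne.symm hvt]
        rw [this]
      · simp [hv]

-- A's guarded increment loop leaves the key list unchanged when every key of ak is present.
theorem gksc_keys_count (ak pool : List String) (d : PySem.Dict String Int)
    (h : ∀ k ∈ ak, d.contains k = true) :
    (pool.foldl (fun d k => if k ∈ ak then d.modify k 0 (· + 1) else d) d).keys = d.keys := by
  induction pool generalizing d with
  | nil => rfl
  | cons t pool ih =>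
    simp only [List.foldl_cons]
    by_cases ht : t ∈ ak
    · simp only [ht, if_true]
      have hc : d.contains t = true := h t ht
      have hk : (d.modify t 0 (· + 1)).keys = d.keys := by
        rw [PySem.Dict.keys_modify, PySem.Dict.keys_insert_of_contains _ _ hc]
      rw [ih _ (fun k hk' => by
        rw [PySem.Dict.contains_modify]
        simp [h k hk']), hk]
    · simp only [ht, if_false]
      exact ih d h

-- The core dict-level equality between A's counting dict and B's table-driven dict.
theorem gksc_dict_eq (ak pool : List String) :
    pool.foldl (fun d k => if k ∈ ak then d.modify k 0 (· + 1) else d)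
        (ak.foldl (fun d k => d.insert k 0) (PySem.Dict.empty : PySem.Dict String Int))
      = ak.foldl
          (fun d k => d.insert k
            ((pool.foldl (fun d t => d.insert t (d.getD t 0 + 1)) (PySem.Dict.empty : PySem.Dict String Int)).getD k 0))
          (PySem.Dict.empty : PySem.Dict String Int) := by
  set d0 : PySem.Dict String Int := ak.foldl (fun d k => d.insert k 0) PySem.Dict.empty with hd0
  set freq : PySem.Dict String Int := pool.foldl (fun d t => d.insert t (d.getD t 0 + 1)) PySem.Dict.empty with hfreq
  have hkeys0 : d0.keys = PySem.Set.ofList ak := by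
    rw [hd0, PySem.Dict.keys_foldl_insert, PySem.Dict.keys_empty, PySem.Set.update_nil_left]
  have hcont : ∀ k ∈ ak, d0.contains k = true := by
    intro k hk
    rw [PySem.Dict.contains_iff_mem_keys, hkeys0, PySem.Set.mem_ofList]
    exact hk
  have hkeys1 : (pool.foldl (fun d k => if k ∈ ak then d.modify k 0 (· + 1) else d) d0).keys
      = PySem.Set.ofList ak := by
    rw [gksc_keys_count ak pool d0 hcont, hkeys0]
  have hkeys2 : (ak.foldl (fun d k => d.insert k (freq.getD k 0)) (PySem.Dict.empty : PySem.Dict String Int)).keys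
      = PySem.Set.ofList ak := by
    rw [PySem.Dict.keys_foldl_insert, PySem.Dict.keys_empty, PySem.Set.update_nil_left]
  have hnodup : (PySem.Set.ofList ak : List String).Nodup := PySem.Set.nodup_ofList ak
  apply PySem.Dict.ext
  rw [PySem.Dict.items_eq_map_keys _ (hkeys1 ▸ hnodup) 0,
      PySem.Dict.items_eq_map_keys _ (hkeys2 ▸ hnodup) 0, hkeys1, hkeys2]
  apply List.map_congr_left
  intro k hk
  have hkak : k ∈ ak := (PySem.Set.mem_ofList ak k).mp hk
  have hv1 : (pool.foldl (fun d k => if k ∈ ak then d.modify k 0 (· + 1) else d) d0).getD k 0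
      = (pool.count k : Int) := by
    rw [gksc_getD_count, hd0, gksc_getD_insert_fold (fun _ => 0)]
    simp [hkak]
  have hv2 : (ak.foldl (fun d k => d.insert k (freq.getD k 0)) (PySem.Dict.empty : PySem.Dict String Int)).getD k 0
      = (pool.count k : Int) := by
    rw [gksc_getD_insert_fold (fun k => freq.getD k 0)]
    simp only [hkak, if_true, hfreq]
    rw [PySem.Dict.getD_foldl_insert_add_one, PySem.Dict.getD_empty]
    ring
  rw [hv1, hv2]

-- ===== VERDICT (by name: the statement is the Claim_ definition above) =====
theorem get_key_sea_count_spec : Claim_equal_get_key_sea_count := by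
  intro all_key text unique _
  unfold Spec_get_key_sea_count get_key_sea_count get_key_sea_count_alt
  dsimp only
  rw [gksc_dict_eq all_key (if unique then PySem.Set.ofList text else text)]
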